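-- pv_equiv track=rewrite | github.com/randlee/synaptic-canvas | scripts/update-registry.py | calculate_metadata
-- ===== SOURCE A (Python) =====
-- from typing import Any, Optional
--
-- def calculate_metadata(packages: list[dict[str, Any]]) -> dict[str, Any]:
--     """Calculate aggregate metadata for registry."""
--     total_commands = sum(p.get("artifacts", {}).get("commands", 0) for p in packages)
--     total_skills = sum(p.get("artifacts", {}).get("skills", 0) for p in packages)
--     total_agents = sum(p.get("artifacts", {}).get("agents", 0) for p in packages)
--     total_scripts = sum(p.get("artifacts", {}).get("scripts", 0) for p in packages)
--
--     return {
--         "totalPackages": len(packages),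
--         "totalCommands": total_commands,
--         "totalSkills": total_skills,
--         "totalAgents": total_agents,
--         "totalScripts": total_scripts,
--     }
-- ===== SOURCE B (Python) =====
-- def calculate_metadata(packages: list[dict[str, dict[str, int]]]) -> dict[str, int]:
--     """Aggregate by iterating each package's artifacts items into one totals
--     dict keyed by artifact name, then project the four requested totals."""
--     totals: dict[str, int] = {}
--     for p in packages:
--         for key, value in p.get("artifacts", {}).items():
--             totals[key] = totals.get(key, 0) + value
--     return {
--         "totalPackages": len(packages),
--         "totalCommands": totals.get("commands", 0),
--         "totalSkills": totals.get("skills", 0),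
--         "totalAgents": totals.get("agents", 0),
--         "totalScripts": totals.get("scripts", 0),
--     }
-- ===== Notes on version B (the rewrite author's own statement) =====
-- stated objective: alternative
-- what changed: A runs four independent per-key sum passes over packages, each doing a keyed lookup per package; B never looks up the four keys while scanning: it folds every (key, value) item of each package's artifacts dict into one accumulated totals dict and only afterwards projects the four totals from that index. Pre_ excludes only assoc-list encodings whose artifacts dict carries a duplicate key, which no real Python dict can represent.
import Mathlib
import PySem

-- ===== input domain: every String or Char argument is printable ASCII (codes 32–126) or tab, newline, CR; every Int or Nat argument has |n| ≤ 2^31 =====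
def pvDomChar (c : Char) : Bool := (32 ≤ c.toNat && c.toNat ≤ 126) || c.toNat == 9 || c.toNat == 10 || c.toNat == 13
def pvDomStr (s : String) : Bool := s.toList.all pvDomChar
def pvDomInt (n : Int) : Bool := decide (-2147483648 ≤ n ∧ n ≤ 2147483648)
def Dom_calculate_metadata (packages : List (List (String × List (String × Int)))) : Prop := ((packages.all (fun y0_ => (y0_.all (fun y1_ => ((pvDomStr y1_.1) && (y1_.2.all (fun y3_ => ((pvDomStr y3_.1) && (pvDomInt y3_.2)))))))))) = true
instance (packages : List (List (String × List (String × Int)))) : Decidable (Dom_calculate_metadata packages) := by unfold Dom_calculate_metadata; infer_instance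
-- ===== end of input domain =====

-- B replaces A's four per-key sum passes by one scan of each package's artifacts items into an
-- accumulated totals dict, projected at the end (alternative decomposition, same cost class).

-- ===== PORT A =====
-- p.get("artifacts", {}).get(key, 0)  (dict lookup with default, exact via PySem.Dict)
def pvArtGet (p : List (String × List (String × Int))) (key : String) : Int :=
  PySem.Dict.getD (PySem.Dict.mk (PySem.Dict.getD (PySem.Dict.mk p) "artifacts" [])) key 0

def calculate_metadata (packages : List (List (String × List (String × Int)))) : List (String × Int) :=
  let total_commands := (packages.map (fun p => pvArtGet p "commands")).sum
  let total_skills := (packages.map (fun p => pvArtGet p "skills")).sum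
  let total_agents := (packages.map (fun p => pvArtGet p "agents")).sum
  let total_scripts := (packages.map (fun p => pvArtGet p "scripts")).sum
  [("totalPackages", PySem.List.len packages),
   ("totalCommands", total_commands),
   ("totalSkills", total_skills),
   ("totalAgents", total_agents),
   ("totalScripts", total_scripts)]

-- ===== PORT B =====
-- inner loop: 'for key, value in p.get("artifacts", {}).items(): totals[key] = totals.get(key, 0) + value'
def pvAccum (totals : PySem.Dict String Int) (p : List (String × List (String × Int))) : PySem.Dict String Int :=
  (PySem.Dict.getD (PySem.Dict.mk p) "artifacts" []).foldl
    (fun t kv => t.insert kv.1 (t.getD kv.1 0 + kv.2)) totals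

def calculate_metadata_alt (packages : List (List (String × List (String × Int)))) : List (String × Int) :=
  let totals := packages.foldl pvAccum PySem.Dict.empty
  [("totalPackages", PySem.List.len packages),
   ("totalCommands", totals.getD "commands" 0),
   ("totalSkills", totals.getD "skills" 0),
   ("totalAgents", totals.getD "agents" 0),
   ("totalScripts", totals.getD "scripts" 0)]

-- ===== PRECONDITION & SPEC =====
-- Pre_ excludes only assoc-list encodings in which a package's "artifacts" value carries a
-- duplicate key: a real Python dict cannot represent that, so A's first-match lookup and B's
-- items iteration are both accidental there.
def Pre_calculate_metadata (packages : List (List (String × List (String × Int)))) : Prop :=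
  ∀ p ∈ packages, ∀ kv ∈ p, kv.1 = "artifacts" → (kv.2.map Prod.fst).Nodup
instance (packages : List (List (String × List (String × Int)))) : Decidable (Pre_calculate_metadata packages) := by unfold Pre_calculate_metadata; infer_instance

def pvWitness_calculate_metadata : (List (List (String × List (String × Int)))) :=
  [[("artifacts", [("commands", 2), ("skills", 1)])], [("name", [])]]

def Spec_calculate_metadata (packages : List (List (String × List (String × Int)))) (out : List (String × Int)) : Prop := out = calculate_metadata_alt packages
instance (packages : List (List (String × List (String × Int)))) (out : List (String × Int)) : Decidable (Spec_calculate_metadata packages out) := by unfold Spec_calculate_metadata; infer_instance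

-- ===== CLAIM (what is proved, stated in full; the proofs are below) =====
def Claim_equal_calculate_metadata : Prop := ∀ (packages : List (List (String × List (String × Int)))), Dom_calculate_metadata packages → Pre_calculate_metadata packages → Spec_calculate_metadata packages (calculate_metadata packages)

-- ===== LEMMAS AND PROOFS =====

-- the accumulation loop over a raw item list adds, at key k, the sum of the values paired with k
theorem pvGetD_foldl_ins (l : List (String × Int)) (t : PySem.Dict String Int) (k : String) :
    (l.foldl (fun t kv => t.insert kv.1 (t.getD kv.1 0 + kv.2)) t).getD k 0
      = t.getD k 0 + ((l.filter (fun kv => kv.1 == k)).map Prod.snd).sum := by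
  induction l generalizing t with
  | nil => simp
  | cons kv rest ih =>
    simp only [List.foldl_cons, List.filter_cons, ih]
    by_cases h : kv.1 = k
    · simp [h, PySem.Dict.getD_insert_self]
      ring
    · rw [PySem.Dict.getD_insert_of_ne _ _ _ (fun e => h e.symm)]
      simp [h]

-- on an item list with distinct keys, that sum is exactly the dict lookup A performs
theorem pvFilter_sum_eq_getD (a : List (String × Int)) (k : String)
    (hnd : (a.map Prod.fst).Nodup) :
    ((a.filter (fun kv => kv.1 == k)).map Prod.snd).sum
      = PySem.Dict.getD (PySem.Dict.mk a) k 0 := by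
  induction a with
  | nil => simp [PySem.Dict.getD_eq_get?_getD, PySem.Dict.get?]
  | cons kv rest ih =>
    simp only [List.map_cons, List.nodup_cons] at hnd
    rw [PySem.Dict.getD_eq_get?_getD, PySem.Dict.get?_mk_cons]
    by_cases h : kv.1 = k
    · have hrest : rest.filter (fun kv' => kv'.1 == k) = [] := by
        apply List.filter_eq_nil_iff.mpr
        intro kv' hmem he
        exact hnd.1 (by rw [h, ← beq_iff_eq.mp he]; exact List.mem_map_of_mem hmem)
      simp [h, hrest]
    · rw [if_neg (by simp [h]), ← PySem.Dict.getD_eq_get?_getD, ← ih hnd.2]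
      simp [h]

-- one fold of pvAccum from any start adds, at key k, A's per-package contributions
theorem pvAccum_foldl (packages : List (List (String × List (String × Int))))
    (t : PySem.Dict String Int) (k : String)
    (hpre : ∀ p ∈ packages, ∀ kv ∈ p, kv.1 = "artifacts" → (kv.2.map Prod.fst).Nodup) :
    (packages.foldl pvAccum t).getD k 0
      = t.getD k 0 + (packages.map (fun p => pvArtGet p k)).sum := by
  induction packages generalizing t with
  | nil => simp
  | cons p ps ih =>
    have hnd : ((PySem.Dict.getD (PySem.Dict.mk p) "artifacts" []).map Prod.fst).Nodup := by
      rw [PySem.Dict.getD_eq_get?_getD]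
      cases hg : PySem.Dict.get? (PySem.Dict.mk p) "artifacts" with
      | none => simp
      | some a =>
        have hmem := PySem.Dict.mem_items_of_get?_eq_some _ hg
        exact hpre p (List.mem_cons_self) ("artifacts", a) hmem rfl
    rw [List.foldl_cons, ih _ (fun q hq => hpre q (List.mem_cons_of_mem _ hq))]
    unfold pvAccum
    rw [pvGetD_foldl_ins, pvFilter_sum_eq_getD _ _ hnd]
    simp only [List.map_cons, List.sum_cons, pvArtGet]
    ring

-- ===== VERDICT (by name: the statement is the Claim_ definition above) =====
theorem calculate_metadata_spec : Claim_equal_calculate_metadata := by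
  intro packages _ hpre
  unfold Spec_calculate_metadata calculate_metadata calculate_metadata_alt
  simp only [pvAccum_foldl packages PySem.Dict.empty _ hpre, PySem.Dict.getD_empty, zero_add]
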